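-- pv_equiv track=rewrite | github.com/gslavisam/Harmonix_AI | harmonix/core/guitar.py | _choose_fret
-- ===== SOURCE A (Python) =====
-- OPEN_STRING_MIDI = {
--     "E": 40,
--     "A": 45,
--     "D": 50,
--     "G": 55,
--     "B": 59,
--     "e": 64,
-- }
--
-- def _choose_fret(string_name: str, target_pitch_class: int, preferred_fret: int) -> int:
--     open_pitch = OPEN_STRING_MIDI[string_name]
--     candidates = [
--         fret
--         for fret in range(0, 13)
--         if (open_pitch + fret) % 12 == target_pitch_class
--     ]
--     return min(candidates, key=lambda fret: (abs(fret - preferred_fret), fret))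
-- ===== SOURCE B (Python) =====
-- OPEN_STRING_MIDI = {
--     "E": 40,
--     "A": 45,
--     "D": 50,
--     "G": 55,
--     "B": 59,
--     "e": 64,
-- }
--
-- def _choose_fret(string_name: str, target_pitch_class: int, preferred_fret: int) -> int:
--     # The matching frets in 0..12 are base and (only when base == 0) 12.
--     base = (target_pitch_class - OPEN_STRING_MIDI[string_name]) % 12
--     if base == 0 and abs(12 - preferred_fret) < abs(preferred_fret):
--         return 12
--     return base
-- ===== Notes on version B (the rewrite author's own statement) =====
-- stated objective: simpler
-- what changed: B computes the matching fret in closed form as base = (target_pitch_class - open_pitch) % 12 and picks 12 over 0 only when strictly closer to the preferred fret, replacing A's filtered scan of frets 0..12 plus min with a tuple key.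
import Mathlib
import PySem

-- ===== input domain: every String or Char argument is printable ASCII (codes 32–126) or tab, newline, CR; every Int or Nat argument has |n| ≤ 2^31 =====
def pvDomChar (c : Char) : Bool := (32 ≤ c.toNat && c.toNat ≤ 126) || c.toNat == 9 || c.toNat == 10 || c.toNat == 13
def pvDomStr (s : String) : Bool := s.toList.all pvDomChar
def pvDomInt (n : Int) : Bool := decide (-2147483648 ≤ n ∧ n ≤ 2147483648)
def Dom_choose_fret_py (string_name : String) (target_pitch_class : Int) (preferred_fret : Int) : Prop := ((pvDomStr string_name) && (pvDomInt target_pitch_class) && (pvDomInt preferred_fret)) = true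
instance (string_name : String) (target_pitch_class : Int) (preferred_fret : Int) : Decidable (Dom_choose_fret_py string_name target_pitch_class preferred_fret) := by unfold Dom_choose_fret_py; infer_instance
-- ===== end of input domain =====

-- B replaces A's 13-fret filtered scan + min by the closed-form base fret
-- (target_pitch_class - open_pitch) % 12, choosing 12 over 0 only when strictly closer
-- to the preferred fret (objective: simpler).

-- ===== PORT A =====
-- module constant OPEN_STRING_MIDI (shared context of both implementations)
def OPEN_STRING_MIDI : PySem.Dict String Int :=
  PySem.Dict.ofList [("E", 40), ("A", 45), ("D", 50), ("G", 55), ("B", 59), ("e", 64)]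

-- KeyError on an unknown string and ValueError on empty candidates are excluded by Pre_,
-- so the total forms getD/(min2? ...).getD 0 are exact there.
def choose_fret_py (string_name : String) (target_pitch_class : Int) (preferred_fret : Int) : Int :=
  let open_pitch := OPEN_STRING_MIDI.getD string_name 0
  let candidates := (PySem.List.pyRange 0 13 1).filter
    (fun fret => PySem.Int.mod (open_pitch + fret) 12 == target_pitch_class)
  (PySem.List.min2? candidates (fun fret => |fret - preferred_fret|) (fun fret => fret)).getD 0

-- ===== PORT B =====
def choose_fret_py_alt (string_name : String) (target_pitch_class : Int) (preferred_fret : Int) : Int :=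
  let base := PySem.Int.mod (target_pitch_class - OPEN_STRING_MIDI.getD string_name 0) 12
  if base = 0 ∧ |12 - preferred_fret| < |preferred_fret| then 12 else base

-- ===== PRECONDITION & SPEC =====
-- Pre_ excludes exactly A's exceptions: KeyError on a string_name that is not one of the six
-- open strings, and ValueError (min of an empty candidate list) when target_pitch_class is
-- outside 0..11.
def Pre_choose_fret_py (string_name : String) (target_pitch_class : Int) (preferred_fret : Int) : Prop :=
  (string_name = "E" ∨ string_name = "A" ∨ string_name = "D" ∨ string_name = "G" ∨
   string_name = "B" ∨ string_name = "e") ∧ 0 ≤ target_pitch_class ∧ target_pitch_class < 12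
instance (string_name : String) (target_pitch_class : Int) (preferred_fret : Int) : Decidable (Pre_choose_fret_py string_name target_pitch_class preferred_fret) := by unfold Pre_choose_fret_py; infer_instance

def pvWitness_choose_fret_py : String × Int × Int := ("E", 4, 5)

def Spec_choose_fret_py (string_name : String) (target_pitch_class : Int) (preferred_fret : Int) (out : Int) : Prop := out = choose_fret_py_alt string_name target_pitch_class preferred_fret
instance (string_name : String) (target_pitch_class : Int) (preferred_fret : Int) (out : Int) : Decidable (Spec_choose_fret_py string_name target_pitch_class preferred_fret out) := by unfold Spec_choose_fret_py; infer_instance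

-- ===== CLAIM (what is proved, stated in full; the proofs are below) =====
def Claim_equal_choose_fret_py : Prop := ∀ (string_name : String) (target_pitch_class : Int) (preferred_fret : Int), Dom_choose_fret_py string_name target_pitch_class preferred_fret → Pre_choose_fret_py string_name target_pitch_class preferred_fret → Spec_choose_fret_py string_name target_pitch_class preferred_fret (choose_fret_py string_name target_pitch_class preferred_fret)

-- ===== LEMMAS AND PROOFS =====
-- For a fixed open string and pitch class, A's candidate list is [0, 12] (base 0) or [base],
-- and min with key (|fret - preferred|, fret) picks 12 only when strictly closer.
lemma pv_bridge (s : String) (tpc pref op b : Int)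
    (hd : OPEN_STRING_MIDI.getD s 0 = op)
    (hb : PySem.Int.mod (tpc - op) 12 = b)
    (hc : (PySem.List.pyRange 0 13 1).filter (fun f => PySem.Int.mod (op + f) 12 == tpc)
          = if b = 0 then [0, 12] else [b]) :
    choose_fret_py s tpc pref = choose_fret_py_alt s tpc pref := by
  simp only [choose_fret_py, choose_fret_py_alt, hd, hb, hc]
  by_cases h0 : b = 0
  · subst h0
    rw [if_pos rfl]
    simp only [PySem.List.min2?, List.foldl, Int.abs_eq_natAbs]
    split_ifs <;> simp_all <;> omega
  · simp only [if_neg h0, PySem.List.min2?, List.foldl, Option.getD]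
    simp [h0]

-- ===== VERDICT (by name: the statement is the Claim_ definition above) =====
theorem choose_fret_py_spec : Claim_equal_choose_fret_py := by
  intro string_name target_pitch_class preferred_fret _ hpre
  unfold Spec_choose_fret_py
  obtain ⟨hs, h0, h12⟩ := hpre
  rcases hs with rfl | rfl | rfl | rfl | rfl | rfl <;> interval_cases target_pitch_class
  · exact pv_bridge "E" 0 preferred_fret 40 8 (by decide) (by decide) (by decide)
  · exact pv_bridge "E" 1 preferred_fret 40 9 (by decide) (by decide) (by decide)
  · exact pv_bridge "E" 2 preferred_fret 40 10 (by decide) (by decide) (by decide)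
  · exact pv_bridge "E" 3 preferred_fret 40 11 (by decide) (by decide) (by decide)
  · exact pv_bridge "E" 4 preferred_fret 40 0 (by decide) (by decide) (by decide)
  · exact pv_bridge "E" 5 preferred_fret 40 1 (by decide) (by decide) (by decide)
  · exact pv_bridge "E" 6 preferred_fret 40 2 (by decide) (by decide) (by decide)
  · exact pv_bridge "E" 7 preferred_fret 40 3 (by decide) (by decide) (by decide)
  · exact pv_bridge "E" 8 preferred_fret 40 4 (by decide) (by decide) (by decide)
  · exact pv_bridge "E" 9 preferred_fret 40 5 (by decide) (by decide) (by decide)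
  · exact pv_bridge "E" 10 preferred_fret 40 6 (by decide) (by decide) (by decide)
  · exact pv_bridge "E" 11 preferred_fret 40 7 (by decide) (by decide) (by decide)
  · exact pv_bridge "A" 0 preferred_fret 45 3 (by decide) (by decide) (by decide)
  · exact pv_bridge "A" 1 preferred_fret 45 4 (by decide) (by decide) (by decide)
  · exact pv_bridge "A" 2 preferred_fret 45 5 (by decide) (by decide) (by decide)
  · exact pv_bridge "A" 3 preferred_fret 45 6 (by decide) (by decide) (by decide)
  · exact pv_bridge "A" 4 preferred_fret 45 7 (by decide) (by decide) (by decide)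
  · exact pv_bridge "A" 5 preferred_fret 45 8 (by decide) (by decide) (by decide)
  · exact pv_bridge "A" 6 preferred_fret 45 9 (by decide) (by decide) (by decide)
  · exact pv_bridge "A" 7 preferred_fret 45 10 (by decide) (by decide) (by decide)
  · exact pv_bridge "A" 8 preferred_fret 45 11 (by decide) (by decide) (by decide)
  · exact pv_bridge "A" 9 preferred_fret 45 0 (by decide) (by decide) (by decide)
  · exact pv_bridge "A" 10 preferred_fret 45 1 (by decide) (by decide) (by decide)
  · exact pv_bridge "A" 11 preferred_fret 45 2 (by decide) (by decide) (by decide)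
  · exact pv_bridge "D" 0 preferred_fret 50 10 (by decide) (by decide) (by decide)
  · exact pv_bridge "D" 1 preferred_fret 50 11 (by decide) (by decide) (by decide)
  · exact pv_bridge "D" 2 preferred_fret 50 0 (by decide) (by decide) (by decide)
  · exact pv_bridge "D" 3 preferred_fret 50 1 (by decide) (by decide) (by decide)
  · exact pv_bridge "D" 4 preferred_fret 50 2 (by decide) (by decide) (by decide)
  · exact pv_bridge "D" 5 preferred_fret 50 3 (by decide) (by decide) (by decide)
  · exact pv_bridge "D" 6 preferred_fret 50 4 (by decide) (by decide) (by decide)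
  · exact pv_bridge "D" 7 preferred_fret 50 5 (by decide) (by decide) (by decide)
  · exact pv_bridge "D" 8 preferred_fret 50 6 (by decide) (by decide) (by decide)
  · exact pv_bridge "D" 9 preferred_fret 50 7 (by decide) (by decide) (by decide)
  · exact pv_bridge "D" 10 preferred_fret 50 8 (by decide) (by decide) (by decide)
  · exact pv_bridge "D" 11 preferred_fret 50 9 (by decide) (by decide) (by decide)
  · exact pv_bridge "G" 0 preferred_fret 55 5 (by decide) (by decide) (by decide)
  · exact pv_bridge "G" 1 preferred_fret 55 6 (by decide) (by decide) (by decide)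
  · exact pv_bridge "G" 2 preferred_fret 55 7 (by decide) (by decide) (by decide)
  · exact pv_bridge "G" 3 preferred_fret 55 8 (by decide) (by decide) (by decide)
  · exact pv_bridge "G" 4 preferred_fret 55 9 (by decide) (by decide) (by decide)
  · exact pv_bridge "G" 5 preferred_fret 55 10 (by decide) (by decide) (by decide)
  · exact pv_bridge "G" 6 preferred_fret 55 11 (by decide) (by decide) (by decide)
  · exact pv_bridge "G" 7 preferred_fret 55 0 (by decide) (by decide) (by decide)
  · exact pv_bridge "G" 8 preferred_fret 55 1 (by decide) (by decide) (by decide)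
  · exact pv_bridge "G" 9 preferred_fret 55 2 (by decide) (by decide) (by decide)
  · exact pv_bridge "G" 10 preferred_fret 55 3 (by decide) (by decide) (by decide)
  · exact pv_bridge "G" 11 preferred_fret 55 4 (by decide) (by decide) (by decide)
  · exact pv_bridge "B" 0 preferred_fret 59 1 (by decide) (by decide) (by decide)
  · exact pv_bridge "B" 1 preferred_fret 59 2 (by decide) (by decide) (by decide)
  · exact pv_bridge "B" 2 preferred_fret 59 3 (by decide) (by decide) (by decide)
  · exact pv_bridge "B" 3 preferred_fret 59 4 (by decide) (by decide) (by decide)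
  · exact pv_bridge "B" 4 preferred_fret 59 5 (by decide) (by decide) (by decide)
  · exact pv_bridge "B" 5 preferred_fret 59 6 (by decide) (by decide) (by decide)
  · exact pv_bridge "B" 6 preferred_fret 59 7 (by decide) (by decide) (by decide)
  · exact pv_bridge "B" 7 preferred_fret 59 8 (by decide) (by decide) (by decide)
  · exact pv_bridge "B" 8 preferred_fret 59 9 (by decide) (by decide) (by decide)
  · exact pv_bridge "B" 9 preferred_fret 59 10 (by decide) (by decide) (by decide)
  · exact pv_bridge "B" 10 preferred_fret 59 11 (by decide) (by decide) (by decide)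
  · exact pv_bridge "B" 11 preferred_fret 59 0 (by decide) (by decide) (by decide)
  · exact pv_bridge "e" 0 preferred_fret 64 8 (by decide) (by decide) (by decide)
  · exact pv_bridge "e" 1 preferred_fret 64 9 (by decide) (by decide) (by decide)
  · exact pv_bridge "e" 2 preferred_fret 64 10 (by decide) (by decide) (by decide)
  · exact pv_bridge "e" 3 preferred_fret 64 11 (by decide) (by decide) (by decide)
  · exact pv_bridge "e" 4 preferred_fret 64 0 (by decide) (by decide) (by decide)
  · exact pv_bridge "e" 5 preferred_fret 64 1 (by decide) (by decide) (by decide)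
  · exact pv_bridge "e" 6 preferred_fret 64 2 (by decide) (by decide) (by decide)
  · exact pv_bridge "e" 7 preferred_fret 64 3 (by decide) (by decide) (by decide)
  · exact pv_bridge "e" 8 preferred_fret 64 4 (by decide) (by decide) (by decide)
  · exact pv_bridge "e" 9 preferred_fret 64 5 (by decide) (by decide) (by decide)
  · exact pv_bridge "e" 10 preferred_fret 64 6 (by decide) (by decide) (by decide)
  · exact pv_bridge "e" 11 preferred_fret 64 7 (by decide) (by decide) (by decide)
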